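-- pv_equiv track=rewrite | github.com/maddiew4844/AIREanalysis | airthings_graph3.py | group_lists
-- ===== SOURCE A (Python) =====
-- def group_lists(participant_data):
--     """Creates 3 lists, one for each educational group, to sort all participant IDs into their respective groups.
--
--     Args:
--         participant_data (dict) : nested dictionary with participant IDs as keys as all data as values.
--
--     Returns:
--         educational_groups (dict) : dictionary containing 3 lists. Each list contains all participant IDs from that
--         educational group.
--     """
--
--     # Initializes dictionary to contain the IDs of all participants in each educational group.
--     educational_groups = {
--     'A' : [],
--     'B' : [],
--     'C' : []
--     }
--
--     for part_id in participant_data.keys():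
--         group = participant_data[part_id]["GroupNO"]
--
--         # Records participant ID into one of the 3 educational group lists.
--         if group == 'A':
--             educational_groups['A'].append(part_id)
--         elif group == 'B':
--             educational_groups['B'].append(part_id)
--         elif group == 'C':
--             educational_groups['C'].append(part_id)
--
--     return educational_groups
-- ===== SOURCE B (Python) =====
-- def group_lists(participant_data):
--     """Creates 3 lists, one for each educational group, to sort all participant IDs into their respective groups."""
--     return {g: [pid for pid, d in participant_data.items() if d["GroupNO"] == g]
--             for g in ('A', 'B', 'C')}
-- ===== Notes on version B (the rewrite author's own statement) =====
-- stated objective: idiomatic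
-- what changed: Replaces the single-pass branch-dispatch loop that mutates three lists inside a dict with a dict comprehension making one independent filtering pass over the participants per group.
import Mathlib
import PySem

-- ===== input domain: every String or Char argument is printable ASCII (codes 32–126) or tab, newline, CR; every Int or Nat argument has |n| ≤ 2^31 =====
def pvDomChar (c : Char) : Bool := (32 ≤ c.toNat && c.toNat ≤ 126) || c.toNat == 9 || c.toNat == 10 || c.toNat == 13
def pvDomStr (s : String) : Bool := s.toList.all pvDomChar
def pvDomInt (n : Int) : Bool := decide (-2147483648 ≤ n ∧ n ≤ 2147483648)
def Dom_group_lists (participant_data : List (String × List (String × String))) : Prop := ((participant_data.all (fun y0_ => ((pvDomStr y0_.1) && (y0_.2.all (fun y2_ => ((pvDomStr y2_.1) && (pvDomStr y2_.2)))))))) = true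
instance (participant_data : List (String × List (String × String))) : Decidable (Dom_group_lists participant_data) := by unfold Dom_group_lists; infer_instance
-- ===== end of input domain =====

-- B replaces A's single-pass branch-dispatch loop by a dict comprehension: one
-- filtering pass over the participants per group ('idiomatic'; same cost).

-- ===== PORT A =====
-- participant_data[part_id]["GroupNO"]: the inner KeyError case is excluded by
-- Pre_group_lists, so the total getD with sentinel "" is exact on Pre_.
def pvGroupOf (D : PySem.Dict String (List (String × String))) (part_id : String) : String :=
  PySem.Dict.getD (PySem.Dict.ofList ((PySem.Dict.get? D part_id).getD [])) "GroupNO" ""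

def group_lists (participant_data : List (String × List (String × String))) : List (String × List String) :=
  let D := PySem.Dict.ofList participant_data
  let educational_groups : PySem.Dict String (List String) :=
    PySem.Dict.ofList [("A", []), ("B", []), ("C", [])]
  let educational_groups :=
    (PySem.Dict.keys D).foldl (fun eg part_id =>
      let group := pvGroupOf D part_id
      if group == "A" then PySem.Dict.modify eg "A" [] (fun l => l ++ [part_id])
      else if group == "B" then PySem.Dict.modify eg "B" [] (fun l => l ++ [part_id])
      else if group == "C" then PySem.Dict.modify eg "C" [] (fun l => l ++ [part_id])
      else eg) educational_groups
  educational_groups.items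

-- ===== PORT B =====
def group_lists_alt (participant_data : List (String × List (String × String))) : List (String × List String) :=
  let items := (PySem.Dict.ofList participant_data).items
  ["A", "B", "C"].map (fun g =>
    (g, (items.filter (fun kv =>
          PySem.Dict.getD (PySem.Dict.ofList kv.2) "GroupNO" "" == g)).map (·.1)))

-- ===== PRECONDITION & SPEC =====
-- Pre_ excludes participants whose record lacks the "GroupNO" key, on which Python A raises KeyError.
def Pre_group_lists (participant_data : List (String × List (String × String))) : Prop :=
  ∀ kv ∈ participant_data, "GroupNO" ∈ kv.2.map Prod.fst
instance (participant_data : List (String × List (String × String))) : Decidable (Pre_group_lists participant_data) := by unfold Pre_group_lists; infer_instance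
def pvWitness_group_lists : (List (String × List (String × String))) :=
  [("p1", [("GroupNO", "A")]), ("p2", [("GroupNO", "Z")]), ("p3", [("GroupNO", "C")])]
def Spec_group_lists (participant_data : List (String × List (String × String))) (out : List (String × List String)) : Prop := out = group_lists_alt participant_data
instance (participant_data : List (String × List (String × String))) (out : List (String × List String)) : Decidable (Spec_group_lists participant_data out) := by unfold Spec_group_lists; infer_instance

-- ===== CLAIM (what is proved, stated in full; the proofs are below) =====
def Claim_equal_group_lists : Prop := ∀ (participant_data : List (String × List (String × String))), Dom_group_lists participant_data → Pre_group_lists participant_data → Spec_group_lists participant_data (group_lists participant_data)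

-- ===== LEMMAS AND PROOFS =====

-- A's loop, run from an arbitrary three-list state, appends the matching ids per group.
lemma fold_inv (grpf : String → String) (ks : List String) (la lb lc : List String) :
    ks.foldl (fun eg part_id =>
      let group := grpf part_id
      if group == "A" then PySem.Dict.modify eg "A" [] (fun l => l ++ [part_id])
      else if group == "B" then PySem.Dict.modify eg "B" [] (fun l => l ++ [part_id])
      else if group == "C" then PySem.Dict.modify eg "C" [] (fun l => l ++ [part_id])
      else eg) (PySem.Dict.mk [("A", la), ("B", lb), ("C", lc)]) =
    PySem.Dict.mk [("A", la ++ ks.filter (fun p => grpf p == "A")),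
                   ("B", lb ++ ks.filter (fun p => grpf p == "B")),
                   ("C", lc ++ ks.filter (fun p => grpf p == "C"))] := by
  induction ks generalizing la lb lc with
  | nil => simp
  | cons k ks ih =>
    simp only [List.foldl_cons, List.filter_cons]
    by_cases hA : grpf k == "A"
    · simp only [hA, if_pos]
      have : PySem.Dict.modify (PySem.Dict.mk [("A", la), ("B", lb), ("C", lc)]) "A" []
          (fun l => l ++ [k]) = PySem.Dict.mk [("A", la ++ [k]), ("B", lb), ("C", lc)] := by
        simp [PySem.Dict.modify, PySem.Dict.contains, PySem.Dict.getD, PySem.Dict.get?, PySem.Dict.insert]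
      rw [this, ih]
      have hB : (grpf k == "B") = false := by simp_all
      have hC : (grpf k == "C") = false := by simp_all
      simp [hB, hC]
    · by_cases hB : grpf k == "B"
      · have hA' : (grpf k == "A") = false := by simp_all
        simp only [hA', hB, Bool.false_eq_true, ite_false, ite_true]
        have : PySem.Dict.modify (PySem.Dict.mk [("A", la), ("B", lb), ("C", lc)]) "B" []
            (fun l => l ++ [k]) = PySem.Dict.mk [("A", la), ("B", lb ++ [k]), ("C", lc)] := by
          simp [PySem.Dict.modify, PySem.Dict.contains, PySem.Dict.getD, PySem.Dict.get?, PySem.Dict.insert]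
        rw [this, ih]
        have hC : (grpf k == "C") = false := by simp_all
        simp [hC]
      · by_cases hC : grpf k == "C"
        · have hA' : (grpf k == "A") = false := by simp_all
          have hB' : (grpf k == "B") = false := by simp_all
          simp only [hA', hB', hC, Bool.false_eq_true, ite_false, ite_true]
          have : PySem.Dict.modify (PySem.Dict.mk [("A", la), ("B", lb), ("C", lc)]) "C" []
              (fun l => l ++ [k]) = PySem.Dict.mk [("A", la), ("B", lb), ("C", lc ++ [k])] := by
            simp [PySem.Dict.modify, PySem.Dict.contains, PySem.Dict.getD, PySem.Dict.get?, PySem.Dict.insert]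
          rw [this, ih]
          simp
        · have hA' : (grpf k == "A") = false := by simp_all
          have hB' : (grpf k == "B") = false := by simp_all
          have hC' : (grpf k == "C") = false := by simp_all
          simp only [hA', hB', hC', Bool.false_eq_true, ite_false]
          rw [ih]

-- keys-side filtering equals items-side filtering, since each item's key looks up its own value.
lemma keys_filter_eq (pd : List (String × List (String × String))) (g : String) :
    ((PySem.Dict.ofList pd).keys).filter (fun p => pvGroupOf (PySem.Dict.ofList pd) p == g) =
    (((PySem.Dict.ofList pd).items).filter (fun kv =>
        PySem.Dict.getD (PySem.Dict.ofList kv.2) "GroupNO" "" == g)).map (·.1) := by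
  have hkeys : (PySem.Dict.ofList pd).keys = ((PySem.Dict.ofList pd).items).map (·.1) := rfl
  rw [hkeys, List.filter_map]
  congr 1
  apply List.filter_congr
  intro kv hkv
  have hkv' : (kv.1, kv.2) ∈ (PySem.Dict.ofList pd).items := by simpa using hkv
  have hget : (PySem.Dict.ofList pd).get? kv.1 = some kv.2 :=
    PySem.Dict.get?_of_mem_items _ hkv' (PySem.Dict.nodup_keys_ofList pd)
  simp [Function.comp, pvGroupOf, hget]

-- ===== VERDICT (by name: the statement is the Claim_ definition above) =====
theorem group_lists_spec : Claim_equal_group_lists := by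
  intro pd _ _
  unfold Spec_group_lists group_lists group_lists_alt
  simp only []
  rw [show PySem.Dict.ofList [("A", ([] : List String)), ("B", []), ("C", [])] =
      PySem.Dict.mk [("A", []), ("B", []), ("C", [])] from rfl,
    fold_inv (pvGroupOf (PySem.Dict.ofList pd))]
  simp [keys_filter_eq]
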